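-- pv_equiv track=rewrite | github.com/Muz-guzgu/bkaczmarczyk | matura/matura 2024 czerwiec/zad4.py | zad_4_1
-- ===== SOURCE A (Python) =====
-- def zad_4_1(wiersze):
--     licznik = 0
--     for wiersz in wiersze:
--         p = 0
--         while p + 2 < len(wiersz):
--             if wiersz[p] == "k" and wiersz[p+2] == "t":
--                 licznik += 1
--                 break
--             p += 1
--     return licznik
-- ===== SOURCE B (Python) =====
-- def zad_4_1(wiersze):
--     licznik = 0
--     for w in wiersze:
--         ks = {i for i, ch in enumerate(w) if ch == "k"}
--         ts = {i - 2 for i, ch in enumerate(w) if ch == "t"}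
--         if ks & ts:
--             licznik += 1
--     return licznik
-- ===== Notes on version B (the rewrite author's own statement) =====
-- stated objective: alternative
-- what changed: Instead of A's windowed index scan with break per row, B builds per row the set of positions of 'k' and the set of positions-of-'t' shifted left by 2 and counts the row when the two sets intersect.
import Mathlib
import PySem

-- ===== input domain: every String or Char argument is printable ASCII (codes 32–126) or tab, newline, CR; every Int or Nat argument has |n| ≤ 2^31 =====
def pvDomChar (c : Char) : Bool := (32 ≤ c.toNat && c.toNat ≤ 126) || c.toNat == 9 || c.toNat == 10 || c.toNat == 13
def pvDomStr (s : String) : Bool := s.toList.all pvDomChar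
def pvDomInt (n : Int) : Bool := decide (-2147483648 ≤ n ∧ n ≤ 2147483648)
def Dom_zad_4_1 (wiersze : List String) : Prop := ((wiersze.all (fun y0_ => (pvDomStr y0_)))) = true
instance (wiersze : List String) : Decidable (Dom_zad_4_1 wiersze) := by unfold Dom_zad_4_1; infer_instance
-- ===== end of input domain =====

-- B replaces A's per-row windowed index scan (while-loop with break) by building per row the set of 'k' positions and the set of 't' positions shifted by 2 and testing their intersection; return values proved equal.


-- ===== PORT A =====
-- inner while loop: p advances while p+2 < len(wiersz); getD is exact since both indices are in range
def zadLoopA (cs : List Char) (p : Nat) : Bool :=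
  if p + 2 < cs.length then
    if cs.getD p ' ' == 'k' && cs.getD (p+2) ' ' == 't' then true
    else zadLoopA cs (p+1)
  else false
termination_by cs.length - p

def zad_4_1 (wiersze : List String) : Int :=
  wiersze.foldl (fun licznik wiersz =>
    if zadLoopA wiersz.toList 0 then licznik + 1 else licznik) 0

-- ===== PORT B =====
-- {i for i, ch in enumerate(w) if ch == "k"} : a set comprehension = Set.ofList of the generated list
def rowB (w : String) : Bool :=
  let ks : PySem.Set Int := PySem.Set.ofList
    (((PySem.List.enumerate w.toList 0).filter (fun p => p.2 == 'k')).map (fun p => p.1))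
  let ts : PySem.Set Int := PySem.Set.ofList
    (((PySem.List.enumerate w.toList 0).filter (fun p => p.2 == 't')).map (fun p => p.1 - 2))
  -- 'if ks & ts:' — a set is truthy iff nonempty
  !(PySem.Set.inter ks ts).isEmpty

def zad_4_1_alt (wiersze : List String) : Int :=
  wiersze.foldl (fun licznik w => if rowB w then licznik + 1 else licznik) 0

-- ===== PRECONDITION & SPEC =====
def Spec_zad_4_1 (wiersze : List String) (out : Int) : Prop := out = zad_4_1_alt wiersze
instance (wiersze : List String) (out : Int) : Decidable (Spec_zad_4_1 wiersze out) := by unfold Spec_zad_4_1; infer_instance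

-- ===== CLAIM =====
def Claim_equal_zad_4_1 : Prop := ∀ (wiersze : List String), Dom_zad_4_1 wiersze → Spec_zad_4_1 wiersze (zad_4_1 wiersze)

-- ===== LEMMAS AND PROOFS =====

lemma zadLoopA_iff (cs : List Char) (p : Nat) :
    zadLoopA cs p = true ↔ ∃ q, p ≤ q ∧ ∃ h : q + 2 < cs.length, cs[q] = 'k' ∧ cs[q+2] = 't' := by
  by_cases h : p + 2 < cs.length
  · rw [zadLoopA]; simp only [h, if_true]
    have h0 : p < cs.length := by omega
    rw [List.getD_eq_getElem cs ' ' h0, List.getD_eq_getElem cs ' ' h]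
    by_cases hk : (cs[p] == 'k' && cs[p+2] == 't') = true
    · simp only [hk, if_true, true_iff]
      simp only [Bool.and_eq_true, beq_iff_eq] at hk
      exact ⟨p, le_refl _, h, hk.1, hk.2⟩
    · simp only [hk]
      rw [if_neg (by simp), zadLoopA_iff cs (p+1)]
      constructor
      · rintro ⟨q, hq, hl, hkt⟩; exact ⟨q, by omega, hl, hkt⟩
      · rintro ⟨q, hq, hl, hk', ht'⟩
        refine ⟨q, ?_, hl, hk', ht'⟩
        rcases Nat.eq_or_lt_of_le hq with rfl | hlt
        · exfalso; apply hk; simp [hk', ht']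
        · omega
  · rw [zadLoopA]; simp only [h, if_false]
    constructor
    · intro hx; exact absurd hx (by decide)
    · rintro ⟨q, hq, hl, _⟩; exfalso; omega
termination_by cs.length - p

lemma rowB_iff (w : String) :
    rowB w = true ↔ ∃ q, ∃ h : q + 2 < w.toList.length, w.toList[q] = 'k' ∧ w.toList[q+2] = 't' := by
  unfold rowB
  simp only [Bool.not_eq_true', List.isEmpty_eq_false_iff_exists_mem]
  constructor
  · rintro ⟨i, hi⟩
    rw [PySem.Set.mem_inter] at hi
    obtain ⟨hik, hit⟩ := hi
    rw [PySem.Set.mem_ofList, List.mem_map] at hik hit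
    obtain ⟨⟨ik, ck⟩, hkmem, hkeq⟩ := hik
    obtain ⟨⟨it, ct⟩, htmem, hteq⟩ := hit
    rw [List.mem_filter] at hkmem htmem
    rw [PySem.List.mem_enumerate_iff] at *
    obtain ⟨⟨a, ha, hpa⟩, hck⟩ := hkmem
    obtain ⟨⟨b, hb, hpb⟩, hct⟩ := htmem
    simp only [Prod.mk.injEq] at hpa hpb
    obtain ⟨ha1, ha2⟩ := hpa; obtain ⟨hb1, hb2⟩ := hpb
    simp only at hkeq hteq hck hct
    -- i = (a : Int), i = (b : Int) - 2, so b = a + 2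
    have hab : (b : Int) = (a : Int) + 2 := by
      rw [ha1] at hkeq; rw [hb1] at hteq; simp at hkeq hteq; omega
    have hb' : b = a + 2 := by exact_mod_cast hab
    subst hb'
    refine ⟨a, hb, ?_, ?_⟩
    · rw [← ha2]; simpa using hck
    · rw [← hb2]; simpa using hct
  · rintro ⟨q, h, hk, ht⟩
    refine ⟨(q : Int), ?_⟩
    rw [PySem.Set.mem_inter, PySem.Set.mem_ofList, PySem.Set.mem_ofList]
    constructor
    · rw [List.mem_map]
      refine ⟨((q : Int), w.toList[q]), ?_, rfl⟩
      rw [List.mem_filter, PySem.List.mem_enumerate_iff]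
      exact ⟨⟨q, by omega, by simp⟩, by simp [hk]⟩
    · rw [List.mem_map]
      refine ⟨(((q : Int) + 2), w.toList[q+2]), ?_, by ring_nf⟩
      rw [List.mem_filter, PySem.List.mem_enumerate_iff]
      exact ⟨⟨q + 2, h, by simp⟩, by simp [ht]⟩

lemma row_eq (w : String) : zadLoopA w.toList 0 = rowB w := by
  rw [Bool.eq_iff_iff, zadLoopA_iff, rowB_iff]
  constructor
  · rintro ⟨q, _, hl, hkt⟩; exact ⟨q, hl, hkt⟩
  · rintro ⟨q, hl, hkt⟩; exact ⟨q, Nat.zero_le _, hl, hkt⟩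

-- ===== VERDICT =====
theorem zad_4_1_spec : Claim_equal_zad_4_1 := by
  intro ws _
  unfold Spec_zad_4_1 zad_4_1 zad_4_1_alt
  congr 1
  funext l w
  rw [row_eq]
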